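-- pv_equiv track=rewrite | github.com/Ezky-2/VSCode | test/learning/Code Forces/VIII MaratonUSP Freshman Contest/Enigma of the Sphinx.py | looper
-- ===== SOURCE A (Python) =====
-- def looper(tester_case):
--
--     if tester_case[0]*3 >= tester_case[1]:
--         return tester_case[0] , tester_case[0] * 3
--
--     tester_case[0] = tester_case[1] // 3
--
--     while True:
--         if tester_case[0]*3 >= tester_case[1]:
--             return tester_case[0] , tester_case[0] * 3
--
--         tester_case[0] = tester_case[0] + 1
-- ===== SOURCE B (Python) =====
-- def looper(tester_case):
--     a, b = tester_case[0], tester_case[1]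
--     if a * 3 >= b:
--         return a, a * 3
--     c = -(-b // 3)  # ceiling division
--     tester_case[0] = c
--     return c, c * 3
-- ===== Notes on version B (the rewrite author's own statement) =====
-- stated objective: simpler
-- what changed: Replaces the increment-until-3a>=b loop with a closed-form ceiling division -(-b//3).
import Mathlib
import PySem

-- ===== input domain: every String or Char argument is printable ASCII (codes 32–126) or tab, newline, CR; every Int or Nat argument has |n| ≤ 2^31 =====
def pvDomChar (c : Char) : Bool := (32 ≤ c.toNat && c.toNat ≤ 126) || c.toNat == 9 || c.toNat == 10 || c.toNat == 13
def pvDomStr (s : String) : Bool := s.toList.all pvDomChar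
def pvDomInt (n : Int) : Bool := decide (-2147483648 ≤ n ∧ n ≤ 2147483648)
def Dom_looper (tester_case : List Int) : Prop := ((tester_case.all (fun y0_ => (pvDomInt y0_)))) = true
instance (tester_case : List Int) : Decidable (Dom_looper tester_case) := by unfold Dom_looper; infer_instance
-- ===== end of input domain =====

-- B replaces A's increment loop by a closed-form ceiling division -(-b//3); A mutates
-- tester_case[0] in the non-early branch and B performs the same mutation in Python;
-- the equivalence proved here is about the return value.

-- ===== PORT A =====
-- the 'while True' loop: state is tester_case[0] (here c); terminates because b - 3*c decreases
def looperLoop (c b : Int) : Int × Int :=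
  if c * 3 ≥ b then (c, c * 3)
  else looperLoop (c + 1) b
  termination_by (b - 3 * c).toNat
  decreasing_by omega

def looper (tester_case : List Int) : Int × Int :=
  let a := (PySem.List.pyGet? tester_case 0).getD 0   -- Pre_ guarantees the index is in range
  let b := (PySem.List.pyGet? tester_case 1).getD 0
  if a * 3 ≥ b then (a, a * 3)
  else looperLoop (PySem.Int.floordiv b 3) b

-- ===== PORT B =====
def looper_alt (tester_case : List Int) : Int × Int :=
  let a := (PySem.List.pyGet? tester_case 0).getD 0
  let b := (PySem.List.pyGet? tester_case 1).getD 0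
  if a * 3 ≥ b then (a, a * 3)
  else
    let c := -(PySem.Int.floordiv (-b) 3)
    (c, c * 3)

-- ===== PRECONDITION & SPEC =====
-- A indexes tester_case[0] and tester_case[1]: lists shorter than 2 raise IndexError
def Pre_looper (tester_case : List Int) : Prop := 2 ≤ tester_case.length
instance (tester_case : List Int) : Decidable (Pre_looper tester_case) := by unfold Pre_looper; infer_instance
def pvWitness_looper : List Int := [1, 10]

def Spec_looper (tester_case : List Int) (out : Int × Int) : Prop := out = looper_alt tester_case
instance (tester_case : List Int) (out : Int × Int) : Decidable (Spec_looper tester_case out) := by unfold Spec_looper; infer_instance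

-- ===== CLAIM (what is proved, stated in full; the proofs are below) =====
def Claim_equal_looper : Prop := ∀ (tester_case : List Int), Dom_looper tester_case → Pre_looper tester_case → Spec_looper tester_case (looper tester_case)

-- ===== LEMMAS AND PROOFS =====

-- the loop started at b // 3 returns exactly the ceiling c = -((-b) // 3)
lemma looperLoop_eq_ceil (b : Int) :
    looperLoop (PySem.Int.floordiv b 3) b = (-(PySem.Int.floordiv (-b) 3), -(PySem.Int.floordiv (-b) 3) * 3) := by
  set q := PySem.Int.floordiv b 3 with hq
  set c := -(PySem.Int.floordiv (-b) 3) with hc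
  have hq' : q * 3 ≤ b ∧ b < (q + 1) * 3 :=
    (PySem.Int.floordiv_eq_iff_of_pos (by norm_num)).mp hq.symm
  have hc' : (c - 1) * 3 < b ∧ b ≤ c * 3 :=
    (PySem.Int.neg_floordiv_neg_eq_iff_of_pos (by norm_num)).mp hc.symm
  unfold looperLoop
  split_ifs with h1
  · have : q = c := by omega
    simp [this]
  · have hqc : q + 1 = c := by omega
    unfold looperLoop
    rw [if_pos (by omega), hqc]

theorem looper_spec : Claim_equal_looper := by
  intro ts _ _
  unfold Spec_looper looper looper_alt
  simp only []
  split
  · rfl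
  · exact looperLoop_eq_ceil _
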